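-- pv_equiv track=rewrite | github.com/fasouto/termmaid | src/termaid/renderer/draw.py | _find_last_turn
-- ===== SOURCE A (Python) =====
-- def _find_last_turn(path: list[tuple[int, int]]) -> int:
--     """Find the index of the last turn in a path. Returns -1 if no turns."""
--     for i in range(len(path) - 2, 0, -1):
--         x_prev, y_prev = path[i - 1]
--         x_curr, y_curr = path[i]
--         x_next, y_next = path[i + 1]
--         # Direction changes at this point
--         dx_in = x_curr - x_prev
--         dy_in = y_curr - y_prev
--         dx_out = x_next - x_curr
--         dy_out = y_next - y_curr
--         if (dx_in, dy_in) != (0, 0) and (dx_out, dy_out) != (0, 0):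
--             # Normalize
--             dx_in = 0 if dx_in == 0 else (1 if dx_in > 0 else -1)
--             dy_in = 0 if dy_in == 0 else (1 if dy_in > 0 else -1)
--             dx_out = 0 if dx_out == 0 else (1 if dx_out > 0 else -1)
--             dy_out = 0 if dy_out == 0 else (1 if dy_out > 0 else -1)
--             if (dx_in, dy_in) != (dx_out, dy_out):
--                 return i
--     return -1
-- ===== SOURCE B (Python) =====
-- def _find_last_turn(path: list[tuple[int, int]]) -> int:
--     """Find the index of the last turn in a path. Returns -1 if no turns."""
--     def sgn(d: int) -> int:
--         return 0 if d == 0 else (1 if d > 0 else -1)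
--
--     # Pass 1: normalized direction of every step.
--     dirs = [(sgn(x2 - x1), sgn(y2 - y1))
--             for (x1, y1), (x2, y2) in zip(path, path[1:])]
--     # Pass 2: last interior index where the direction actually changes.
--     last = -1
--     for i in range(1, len(dirs)):
--         if dirs[i - 1] != (0, 0) and dirs[i] != (0, 0) and dirs[i - 1] != dirs[i]:
--             last = i
--     return last
-- ===== Notes on version B (the rewrite author's own statement) =====
-- stated objective: alternative
-- what changed: Replaces the single backward scan that recomputes and normalizes three points per candidate with two passes: first a table of normalized step directions built from zipped consecutive points, then a forward scan keeping the last index where adjacent directions differ.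
import Mathlib
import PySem

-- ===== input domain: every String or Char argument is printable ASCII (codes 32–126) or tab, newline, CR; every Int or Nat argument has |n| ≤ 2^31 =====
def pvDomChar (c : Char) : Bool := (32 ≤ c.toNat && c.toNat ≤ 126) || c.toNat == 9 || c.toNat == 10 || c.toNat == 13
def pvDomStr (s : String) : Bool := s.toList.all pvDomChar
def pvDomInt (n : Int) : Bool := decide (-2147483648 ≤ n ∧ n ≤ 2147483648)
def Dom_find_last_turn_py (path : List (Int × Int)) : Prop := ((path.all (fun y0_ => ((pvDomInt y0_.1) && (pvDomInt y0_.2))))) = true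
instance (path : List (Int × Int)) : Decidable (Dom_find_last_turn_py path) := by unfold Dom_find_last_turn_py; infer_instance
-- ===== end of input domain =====

-- B replaces A's backward three-point scan by two passes: a table of normalized step
-- directions, then a forward scan keeping the last index where adjacent directions differ
-- (objective: alternative decomposition, same O(n) cost).

-- ===== PORT A =====
-- A's for-loop with early return, over range(len(path)-2, 0, -1).
-- The '_, _, _' fallback is unreachable (every index in the range is valid);
-- Python never raises here.
def findLastTurnLoopA (path : List (Int × Int)) : List Int → Int
  | [] => -1
  | i :: rest =>
    match PySem.List.pyGet? path (i - 1), PySem.List.pyGet? path i, PySem.List.pyGet? path (i + 1) with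
    | some (xp, yp), some (xc, yc), some (xn, yn) =>
      let dxin := xc - xp
      let dyin := yc - yp
      let dxout := xn - xc
      let dyout := yn - yc
      if (dxin, dyin) ≠ ((0 : Int), (0 : Int)) ∧ (dxout, dyout) ≠ ((0 : Int), (0 : Int)) then
        let ndxin : Int := if dxin = 0 then 0 else if dxin > 0 then 1 else -1
        let ndyin : Int := if dyin = 0 then 0 else if dyin > 0 then 1 else -1
        let ndxout : Int := if dxout = 0 then 0 else if dxout > 0 then 1 else -1
        let ndyout : Int := if dyout = 0 then 0 else if dyout > 0 then 1 else -1
        if (ndxin, ndyin) ≠ (ndxout, ndyout) then i else findLastTurnLoopA path rest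
      else findLastTurnLoopA path rest
    | _, _, _ => findLastTurnLoopA path rest

def find_last_turn_py (path : List (Int × Int)) : Int :=
  findLastTurnLoopA path (PySem.List.pyRange ((path.length : Int) - 2) 0 (-1))

-- ===== PORT B =====
def pySgn (d : Int) : Int := if d = 0 then 0 else if d > 0 then 1 else -1

-- dirs = [(sgn(x2-x1), sgn(y2-y1)) for (x1,y1),(x2,y2) in zip(path, path[1:])]
-- (path[1:] on a list is List.drop 1)
def stepDirs (path : List (Int × Int)) : List (Int × Int) :=
  (path.zip (path.drop 1)).map (fun q => (pySgn (q.2.1 - q.1.1), pySgn (q.2.2 - q.1.2)))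

def find_last_turn_py_alt (path : List (Int × Int)) : Int :=
  let dirs := stepDirs path
  (PySem.List.pyRange 1 (dirs.length : Int) 1).foldl
    (fun last i =>
      match PySem.List.pyGet? dirs (i - 1), PySem.List.pyGet? dirs i with
      | some a, some b =>
        if a ≠ ((0 : Int), (0 : Int)) ∧ b ≠ ((0 : Int), (0 : Int)) ∧ a ≠ b then i else last
      | _, _ => last) (-1)

-- ===== PRECONDITION & SPEC =====
def Spec_find_last_turn_py (path : List (Int × Int)) (out : Int) : Prop := out = find_last_turn_py_alt path
instance (path : List (Int × Int)) (out : Int) : Decidable (Spec_find_last_turn_py path out) := by unfold Spec_find_last_turn_py; infer_instance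

-- ===== CLAIM (what is proved, stated in full; the proofs are below) =====
def Claim_equal_find_last_turn_py : Prop := ∀ (path : List (Int × Int)), Dom_find_last_turn_py path → Spec_find_last_turn_py path (find_last_turn_py path)

-- ===== LEMMAS AND PROOFS =====

-- A's per-index turn test, as a Bool predicate.
def pA (path : List (Int × Int)) (i : Int) : Bool :=
  match PySem.List.pyGet? path (i - 1), PySem.List.pyGet? path i, PySem.List.pyGet? path (i + 1) with
  | some (xp, yp), some (xc, yc), some (xn, yn) =>
    decide ((xc - xp, yc - yp) ≠ ((0 : Int), (0 : Int)) ∧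
            (xn - xc, yn - yc) ≠ ((0 : Int), (0 : Int)) ∧
            (pySgn (xc - xp), pySgn (yc - yp)) ≠ (pySgn (xn - xc), pySgn (yn - yc)))
  | _, _, _ => false

-- B's per-index turn test.
def pB (dirs : List (Int × Int)) (i : Int) : Bool :=
  match PySem.List.pyGet? dirs (i - 1), PySem.List.pyGet? dirs i with
  | some a, some b =>
    decide (a ≠ ((0 : Int), (0 : Int)) ∧ b ≠ ((0 : Int), (0 : Int)) ∧ a ≠ b)
  | _, _ => false

theorem loopA_cons (path : List (Int × Int)) (i : Int) (rest : List Int) :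
    findLastTurnLoopA path (i :: rest) =
      if pA path i then i else findLastTurnLoopA path rest := by
  simp only [findLastTurnLoopA]
  cases h1 : PySem.List.pyGet? path (i - 1) <;>
    cases h2 : PySem.List.pyGet? path i <;>
      cases h3 : PySem.List.pyGet? path (i + 1) <;>
        simp only [pA, h1, h2, h3, Bool.false_eq_true, if_false]
  rename_i p1 p2 p3
  obtain ⟨xp, yp⟩ := p1; obtain ⟨xc, yc⟩ := p2; obtain ⟨xn, yn⟩ := p3
  simp only [← pySgn.eq_def, decide_eq_true_eq]
  by_cases hc : (xc - xp, yc - yp) ≠ ((0 : Int), (0 : Int)) ∧ (xn - xc, yn - yc) ≠ ((0 : Int), (0 : Int)) <;>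
    by_cases hn : (pySgn (xc - xp), pySgn (yc - yp)) ≠ (pySgn (xn - xc), pySgn (yn - yc)) <;>
      [skip; skip; skip; skip] <;>
      first
        | (rw [if_pos hc, if_pos hn, if_pos (by tauto)])
        | (rw [if_pos hc, if_neg hn, if_neg (by tauto)])
        | (rw [if_neg hc, if_neg (by tauto)])

theorem loopA_eq_find? (path : List (Int × Int)) (l : List Int) :
    findLastTurnLoopA path l = (l.find? (pA path)).getD (-1) := by
  induction l with
  | nil => simp [findLastTurnLoopA]
  | cons i rest ih =>
    rw [loopA_cons]
    by_cases h : pA path i <;> simp [h, ih]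

theorem foldl_last_eq_find?_reverse (p : Int → Bool) (l : List Int) (d : Int) :
    l.foldl (fun acc i => if p i then i else acc) d = (l.reverse.find? p).getD d := by
  induction l using List.reverseRecOn with
  | nil => simp
  | append_singleton l a ih =>
    rw [List.foldl_append, List.reverse_append]
    by_cases h : p a <;> simp [h, ih]

theorem altBody_eq (dirs : List (Int × Int)) :
    (fun (last : Int) (i : Int) =>
      match PySem.List.pyGet? dirs (i - 1), PySem.List.pyGet? dirs i with
      | some a, some b =>
        if a ≠ ((0 : Int), (0 : Int)) ∧ b ≠ ((0 : Int), (0 : Int)) ∧ a ≠ b then i else last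
      | _, _ => last) =
    (fun (last : Int) (i : Int) => if pB dirs i then i else last) := by
  funext last i
  cases h1 : PySem.List.pyGet? dirs (i - 1) <;> cases h2 : PySem.List.pyGet? dirs i <;>
    simp [pB, h1, h2]

theorem find?_congr_mem (p q : Int → Bool) (l : List Int)
    (h : ∀ x ∈ l, p x = q x) : l.find? p = l.find? q := by
  induction l with
  | nil => rfl
  | cons a l ih =>
    have ha := h a (List.mem_cons_self ..)
    simp only [List.find?_cons, ha]
    cases q a
    · exact ih fun x hx => h x (List.mem_cons_of_mem _ hx)
    · rfl

theorem pySgn_eq_zero_iff (d : Int) : pySgn d = 0 ↔ d = 0 := by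
  unfold pySgn
  split_ifs with h1 h2
  · simp [h1]
  · constructor <;> intro h <;> [exact absurd h (by norm_num); exact absurd h h1]
  · constructor <;> intro h <;> [exact absurd h (by norm_num); exact absurd h h1]

theorem pair_sgn_ne (u v : Int) :
    ((pySgn u, pySgn v) ≠ ((0 : Int), (0 : Int))) ↔ ((u, v) ≠ ((0 : Int), (0 : Int))) := by
  simp [Prod.ext_iff, pySgn_eq_zero_iff]

theorem stepDirs_length (path : List (Int × Int)) :
    (stepDirs path).length = path.length - 1 := by
  simp [stepDirs]

theorem stepDirs_getElem (path : List (Int × Int)) (k : Nat)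
    (hk : k < (stepDirs path).length) (h1 : k < path.length) (h2 : k + 1 < path.length) :
    (stepDirs path)[k] =
      (pySgn (path[k + 1].1 - path[k].1), pySgn (path[k + 1].2 - path[k].2)) := by
  simp [stepDirs]

theorem pA_eq_pB (path : List (Int × Int)) (i : Int)
    (h1 : 1 ≤ i) (h2 : i < (path.length : Int) - 1) :
    pA path i = pB (stepDirs path) i := by
  have hdl : (stepDirs path).length = path.length - 1 := stepDirs_length path
  obtain ⟨j, rfl⟩ : ∃ j : Nat, i = (j : Int) := ⟨i.toNat, by omega⟩
  have hj1 : 1 ≤ j := by omega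
  have hj2 : j + 1 < path.length := by omega
  have e1 : PySem.List.pyGet? path ((j : Int) - 1) = some (path[j - 1]'(by omega)) := by
    rw [show ((j : Int) - 1) = ((j - 1 : Nat) : Int) by omega]
    exact PySem.List.pyGet?_ofNat path (j - 1) (by omega)
  have e2 : PySem.List.pyGet? path (j : Int) = some (path[j]'(by omega)) :=
    PySem.List.pyGet?_ofNat path j (by omega)
  have e3 : PySem.List.pyGet? path ((j : Int) + 1) = some (path[j + 1]'(by omega)) := by
    rw [show ((j : Int) + 1) = ((j + 1 : Nat) : Int) by omega]
    exact PySem.List.pyGet?_ofNat path (j + 1) (by omega)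
  have d1 : PySem.List.pyGet? (stepDirs path) ((j : Int) - 1) =
      some ((pySgn ((path[j]'(by omega)).1 - (path[j - 1]'(by omega)).1),
             pySgn ((path[j]'(by omega)).2 - (path[j - 1]'(by omega)).2))) := by
    rw [show ((j : Int) - 1) = ((j - 1 : Nat) : Int) by omega]
    rw [PySem.List.pyGet?_ofNat (stepDirs path) (j - 1) (by omega)]
    have := stepDirs_getElem path (j - 1) (by omega) (by omega) (by omega)
    rw [this]
    simp [show j - 1 + 1 = j by omega]
  have d2 : PySem.List.pyGet? (stepDirs path) (j : Int) =
      some ((pySgn ((path[j + 1]'(by omega)).1 - (path[j]'(by omega)).1),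
             pySgn ((path[j + 1]'(by omega)).2 - (path[j]'(by omega)).2))) := by
    rw [PySem.List.pyGet?_ofNat (stepDirs path) j (by omega)]
    rw [stepDirs_getElem path j (by omega) (by omega) hj2]
  simp only [pA, pB, e1, e2, e3, d1, d2, decide_eq_decide]
  rw [pair_sgn_ne, pair_sgn_ne]
  simp [List.get_eq_getElem]

theorem find_last_turn_eq (path : List (Int × Int)) :
    find_last_turn_py path = find_last_turn_py_alt path := by
  have hdl : (stepDirs path).length = path.length - 1 := stepDirs_length path
  rw [find_last_turn_py, find_last_turn_py_alt]
  simp only [altBody_eq]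
  rw [foldl_last_eq_find?_reverse, loopA_eq_find?]
  rw [show PySem.List.pyRange ((path.length : Int) - 2) 0 (-1) =
      (PySem.List.pyRange 1 ((path.length : Int) - 1) 1).reverse by
    rw [PySem.List.pyRange_neg_one_eq_reverse,
        show (0 : Int) + 1 = 1 by norm_num,
        show (path.length : Int) - 2 + 1 = (path.length : Int) - 1 by ring]]
  rw [show PySem.List.pyRange 1 (((stepDirs path).length : Int)) 1 =
      PySem.List.pyRange 1 ((path.length : Int) - 1) 1 by
    rcases path with _ | ⟨a, rest⟩
    · simp [stepDirs, PySem.List.pyRange_one_eq_nil]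
    · have hc : (((a :: rest).length - 1 : Nat) : Int) = ((a :: rest).length : Int) - 1 := by
        simp only [List.length_cons]; omega
      rw [stepDirs_length, hc]]
  rw [find?_congr_mem (pA path) (pB (stepDirs path))]
  intro x hx
  rw [List.mem_reverse, PySem.List.mem_pyRange_one] at hx
  exact pA_eq_pB path x hx.1 hx.2

-- ===== VERDICT (by name: the statement is the Claim_ definition above) =====
theorem find_last_turn_py_spec : Claim_equal_find_last_turn_py := by
  intro path _
  unfold Spec_find_last_turn_py
  exact find_last_turn_eq path
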